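-- pv_equiv track=rewrite | github.com/lyx-GitH/astro_cli | engine/parser.py | _split_user_args
-- ===== SOURCE A (Python) =====
-- from typing import List, Sequence, TYPE_CHECKING
--
-- def _split_user_args(args: Sequence[str]) -> tuple[List[str], List[str]]:
--     input_files: List[str] = []
--     extra_args: List[str] = []
--     for arg in args:
--         if extra_args:
--             extra_args.append(arg)
--             continue
--         if arg.startswith("-"):
--             extra_args.append(arg)
--         else:
--             input_files.append(arg)
--     return input_files, extra_args
-- ===== SOURCE B (Python) =====
-- from typing import List, Sequence
--
-- def _split_user_args(args: Sequence[str]) -> tuple[List[str], List[str]]: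
--     boundary = next((i for i, a in enumerate(args) if a.startswith("-")), len(args))
--     return list(args[:boundary]), list(args[boundary:])
-- ===== Notes on version B (the rewrite author's own statement) =====
-- stated objective: simpler
-- what changed: Replaces A's stateful accumulator loop (two lists, mode switch on extra_args being nonempty) with computing the split boundary (index of the first '-'-prefixed arg) and returning the two slices around it.
import Mathlib
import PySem

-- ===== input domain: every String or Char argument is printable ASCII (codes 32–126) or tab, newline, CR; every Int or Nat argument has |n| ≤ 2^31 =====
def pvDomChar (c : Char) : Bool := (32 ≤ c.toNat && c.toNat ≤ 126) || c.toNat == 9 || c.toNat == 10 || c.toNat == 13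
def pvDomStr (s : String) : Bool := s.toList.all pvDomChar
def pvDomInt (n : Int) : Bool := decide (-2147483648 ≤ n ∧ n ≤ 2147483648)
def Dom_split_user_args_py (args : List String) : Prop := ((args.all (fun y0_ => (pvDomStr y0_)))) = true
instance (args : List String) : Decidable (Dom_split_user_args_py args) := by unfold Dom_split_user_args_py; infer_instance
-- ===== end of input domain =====

-- B replaces A's stateful two-list accumulator loop with computing the split boundary
-- (index of the first '-'-prefixed arg) and slicing around it; objective: simpler.

-- ===== PORT A =====
-- A's loop, as a fold over the pair (input_files, extra_args)
def split_user_args_py (args : List String) : List String × List String :=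
  args.foldl
    (fun s arg =>
      if s.2 ≠ [] then (s.1, s.2 ++ [arg])
      else if PySem.Str.startswith arg "-" then (s.1, s.2 ++ [arg])
      else (s.1 ++ [arg], s.2))
    ([], [])

-- ===== PORT B =====
-- boundary = next((i for i, a in enumerate(args) if a.startswith("-")), len(args))
def splitBoundary (args : List String) : Nat :=
  match args with
  | [] => 0
  | a :: rest => if PySem.Str.startswith a "-" then 0 else splitBoundary rest + 1

def split_user_args_py_alt (args : List String) : List String × List String :=
  (args.take (splitBoundary args), args.drop (splitBoundary args))

-- ===== PRECONDITION & SPEC =====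
def Spec_split_user_args_py (args : List String) (out : List String × List String) : Prop := out = split_user_args_py_alt args
instance (args : List String) (out : List String × List String) : Decidable (Spec_split_user_args_py args out) := by unfold Spec_split_user_args_py; infer_instance

-- ===== CLAIM (what is proved, stated in full; the proofs are below) =====
def Claim_equal_split_user_args_py : Prop := ∀ (args : List String), Dom_split_user_args_py args → Spec_split_user_args_py args (split_user_args_py args)

-- ===== LEMMAS AND PROOFS =====

-- once extra_args is nonempty, A's loop only appends to it
theorem foldl_extra_nonempty (args : List String) (acc e : List String) (he : e ≠ []) :
    args.foldl
      (fun s arg =>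
        if s.2 ≠ [] then (s.1, s.2 ++ [arg])
        else if PySem.Str.startswith arg "-" then (s.1, s.2 ++ [arg])
        else (s.1 ++ [arg], s.2))
      (acc, e) = (acc, e ++ args) := by
  induction args generalizing e with
  | nil => simp
  | cons a rest ih =>
    simp only [List.foldl_cons, if_pos he]
    rw [ih (e ++ [a]) (by simp)]
    simp

-- A's loop from an empty extra_args produces acc ++ take-boundary and drop-boundary
theorem foldl_main (args : List String) (acc : List String) :
    args.foldl
      (fun s arg =>
        if s.2 ≠ [] then (s.1, s.2 ++ [arg])
        else if PySem.Str.startswith arg "-" then (s.1, s.2 ++ [arg])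
        else (s.1 ++ [arg], s.2))
      (acc, []) = (acc ++ args.take (splitBoundary args), args.drop (splitBoundary args)) := by
  induction args generalizing acc with
  | nil => simp
  | cons a rest ih =>
    simp only [List.foldl_cons, splitBoundary]
    by_cases h : PySem.Str.startswith a "-"
    · simp only [h, if_pos, if_neg (by simp : ¬ (([] : List String) ≠ [])),
        List.nil_append]
      rw [foldl_extra_nonempty rest acc [a] (by simp)]
      simp
    · simp only [h, if_neg (by simp : ¬ (([] : List String) ≠ [])), if_false, Bool.false_eq_true]
      rw [ih (acc ++ [a])]
      simp

-- ===== VERDICT (by name: the statement is the Claim_ definition above) =====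
theorem split_user_args_py_spec : Claim_equal_split_user_args_py := by
  intro args _
  show split_user_args_py args = split_user_args_py_alt args
  unfold split_user_args_py split_user_args_py_alt
  rw [foldl_main args []]
  simp
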